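-- pv_equiv track=rewrite | github.com/Keith1039/Python-school-work | a5_300246636.py | fix_sortingnet
-- ===== SOURCE A (Python) =====
-- def fix_sortingnet(network,sortedlist):
--     newnet = []
--     for i in range(len(sortedlist)):
--         compare1= sortedlist[i]
--         for i in range(len(network)):
--             if compare1 == network[i][0]:
--                 newnet.append(network[i])
--     return(newnet)
-- ===== SOURCE B (Python) =====
-- def fix_sortingnet(network, sortedlist):
--     # Group network rows by their first element once, then a single pass over sortedlist.
--     groups = {}
--     for row in network:
--         groups.setdefault(row[0], []).append(row)
--     out = []
--     for v in sortedlist: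
--         out.extend(groups.get(v, []))
--     return out
-- ===== Notes on version B (the rewrite author's own statement) =====
-- stated objective: alternative
-- what changed: Replaces the nested scan (for each sortedlist value, rescan all of network) with a dict grouping network rows by first element built in one pass, then a single pass over sortedlist concatenating the groups.
-- outside the precondition, e.g. on fix_sortingnet([[]], []): A returns [], B raises IndexError
import Mathlib
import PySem

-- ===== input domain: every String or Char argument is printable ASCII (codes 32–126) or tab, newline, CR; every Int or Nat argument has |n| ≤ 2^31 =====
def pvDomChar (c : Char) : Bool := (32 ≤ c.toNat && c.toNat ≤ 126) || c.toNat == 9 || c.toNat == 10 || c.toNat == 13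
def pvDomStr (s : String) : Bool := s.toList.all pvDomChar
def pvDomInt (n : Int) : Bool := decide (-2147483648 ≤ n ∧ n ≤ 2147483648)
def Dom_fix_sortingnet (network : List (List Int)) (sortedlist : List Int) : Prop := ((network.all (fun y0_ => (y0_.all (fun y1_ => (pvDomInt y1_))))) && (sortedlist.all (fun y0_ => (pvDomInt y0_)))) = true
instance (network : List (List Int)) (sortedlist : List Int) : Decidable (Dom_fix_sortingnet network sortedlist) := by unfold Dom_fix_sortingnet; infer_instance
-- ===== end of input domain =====

-- B groups network rows by first element in a dict built once, then one pass over sortedlist instead of A's nested rescans; Pre_ excludes networks containing an empty row (A raises IndexError on row[0] whenever sortedlist is nonempty, B always).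


-- ===== PORT A =====
-- indexing: the loops index with i in range(len(..)), always in range under Pre_,
-- so getD with a default is exact there (Python raises on an empty row's [0]; Pre_ excludes that)
def fix_sortingnet (network : List (List Int)) (sortedlist : List Int) : List (List Int) :=
  (List.range sortedlist.length).foldl
    (fun newnet i =>
      let compare1 := sortedlist.getD i 0
      (List.range network.length).foldl
        (fun newnet j =>
          if compare1 = (network.getD j []).headD 0 then newnet ++ [network.getD j []] else newnet)
        newnet)
    []

-- ===== PORT B =====
def fix_sortingnet_alt (network : List (List Int)) (sortedlist : List Int) : List (List Int) :=
  let groups : PySem.Dict Int (List (List Int)) :=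
    network.foldl (fun g row => g.modify (row.headD 0) [] (· ++ [row])) PySem.Dict.empty
  sortedlist.foldl (fun out v => out ++ groups.getD v []) []

-- ===== PRECONDITION & SPEC =====
-- Pre_ excludes networks containing an empty row: there A raises IndexError whenever sortedlist
-- is nonempty, and B raises on row[0] always (so A's return [] for empty sortedlist is unmatchable).
def Pre_fix_sortingnet (network : List (List Int)) (sortedlist : List Int) : Prop :=
  ∀ row ∈ network, row ≠ []
instance (network : List (List Int)) (sortedlist : List Int) : Decidable (Pre_fix_sortingnet network sortedlist) := by unfold Pre_fix_sortingnet; infer_instance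
def pvWitness_fix_sortingnet : List (List Int) × List Int := ([[2, 7], [1, 5], [2, 9]], [1, 2, 3])

def Spec_fix_sortingnet (network : List (List Int)) (sortedlist : List Int) (out : List (List Int)) : Prop := out = fix_sortingnet_alt network sortedlist
instance (network : List (List Int)) (sortedlist : List Int) (out : List (List Int)) : Decidable (Spec_fix_sortingnet network sortedlist out) := by unfold Spec_fix_sortingnet; infer_instance

-- ===== CLAIM (what is proved, stated in full; the proofs are below) =====
def Claim_equal_fix_sortingnet : Prop := ∀ (network : List (List Int)) (sortedlist : List Int), Dom_fix_sortingnet network sortedlist → Pre_fix_sortingnet network sortedlist → Spec_fix_sortingnet network sortedlist (fix_sortingnet network sortedlist)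

-- ===== LEMMAS AND PROOFS =====

-- a fold over range(len xs) that only reads xs.getD i is a fold over xs itself
theorem foldl_range_getD {α β : Type} (xs : List α) (d : α) (g : β → α → β) :
    ∀ acc : β, (List.range xs.length).foldl (fun a i => g a (xs.getD i d)) acc = xs.foldl g acc := by
  induction xs with
  | nil => intro acc; simp
  | cons x xs ih =>
      intro acc
      simp only [List.length_cons, List.range_succ_eq_map, List.foldl_cons, List.foldl_map,
        List.getD_cons_zero, List.getD_cons_succ]
      exact ih (g acc x)

-- the group built by B's dict loop is exactly the filter of network on first element
theorem groups_getD (network : List (List Int)) (v : Int) :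
    (network.foldl (fun g row => g.modify (row.headD 0) [] (· ++ [row]))
        (PySem.Dict.empty : PySem.Dict Int (List (List Int)))).getD v []
      = network.filter (fun r => r.headD 0 == v) := by
  have h := PySem.Dict.getD_foldl_modify_append
      (l := network.map (fun r => (r.headD 0, r)))
      (d := (PySem.Dict.empty : PySem.Dict Int (List (List Int)))) (c := v)
  rw [List.foldl_map] at h
  simpa [List.filter_map, Function.comp_def] using h

-- ===== VERDICT (by name: the statement is the Claim_ definition above) =====
theorem fix_sortingnet_spec : Claim_equal_fix_sortingnet := by
  intro network sortedlist _ _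
  unfold Spec_fix_sortingnet fix_sortingnet fix_sortingnet_alt
  refine Eq.trans
    (foldl_range_getD sortedlist 0
      (fun newnet c =>
        (List.range network.length).foldl
          (fun newnet j =>
            if c = (network.getD j []).headD 0 then newnet ++ [network.getD j []] else newnet)
          newnet) []) ?_
  apply PySem.List.foldl_congr_mem
  intro acc v _
  rw [foldl_range_getD network [] (fun a r => if v = r.headD 0 then a ++ [r] else a) acc,
    groups_getD, PySem.List.foldl_append_ite_eq_filter]
  congr 1
  apply List.filter_congr
  intro r _
  rw [Bool.eq_iff_iff]
  simp only [beq_iff_eq, decide_eq_true_eq]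
  exact eq_comm
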